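-- pv_equiv track=rewrite | github.com/ALTA-DE1-Hafidz-15Feb1998/Basic-Programming-Part5 | problem4/main.py | muncul_sekali
-- ===== SOURCE A (Python) =====
-- def muncul_sekali(angka):
--     # Membuat dictionary untuk menghitung berapa kali setiap angka muncul
--     count_dict = {}
--
--     # Menghitung frekuensi munculnya setiap angka dalam string
--     for digit in angka:
--         if digit in count_dict:
--             count_dict[digit] += 1
--         else:
--             count_dict[digit] = 1
--
--     # Membuat list untuk menyimpan angka yang hanya muncul satu kali
--     result = []
--     for digit, count in count_dict.items():
--         if count == 1:
--             result.append(int(digit))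
--
--     return result
-- ===== SOURCE B (Python) =====
-- def muncul_sekali(angka):
--     # Keep each character that occurs exactly once, in input order (= A's
--     # dict first-occurrence order, since kept characters occur only once).
--     return [int(d) for d in angka if angka.count(d) == 1]
-- ===== Notes on version B (the rewrite author's own statement) =====
-- stated objective: simpler
-- what changed: Drops the frequency dictionary entirely: one comprehension that re-scans the string with str.count for each character, keeping those whose count is exactly 1; order agrees with A because kept characters occur only once.
import Mathlib
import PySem

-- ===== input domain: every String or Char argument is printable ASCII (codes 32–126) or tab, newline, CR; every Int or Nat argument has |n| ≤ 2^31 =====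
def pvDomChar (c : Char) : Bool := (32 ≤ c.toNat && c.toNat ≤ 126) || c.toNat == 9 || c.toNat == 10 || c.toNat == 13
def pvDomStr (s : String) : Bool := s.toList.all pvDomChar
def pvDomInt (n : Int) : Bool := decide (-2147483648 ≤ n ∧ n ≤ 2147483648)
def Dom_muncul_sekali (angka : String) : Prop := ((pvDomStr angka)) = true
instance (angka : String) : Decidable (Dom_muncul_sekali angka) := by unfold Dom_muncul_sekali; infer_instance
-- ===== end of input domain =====

-- B replaces A's frequency dictionary with a single filter that re-scans the
-- string with str.count for each character (simpler; no speed claim).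


-- int(c) for a one-character string c, as both Pythons call it; the .getD 0
-- default is never reached inside Pre_ (every kept character is a digit there).
def pyIntChar (c : Char) : Int := (PySem.Int.ofChars? [c]).getD 0

-- ===== PORT A =====
def muncul_sekali (angka : String) : List Int :=
  let count_dict :=
    angka.toList.foldl
      (fun d digit =>
        if d.contains digit then d.insert digit (d.getD digit 0 + 1)
        else d.insert digit 1)
      (PySem.Dict.empty : PySem.Dict Char Int)
  count_dict.items.foldl
    (fun result p => if p.2 == 1 then result ++ [pyIntChar p.1] else result) []

-- ===== PORT B =====
def muncul_sekali_alt (angka : String) : List Int :=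
  (angka.toList.filter
    (fun d => PySem.Chars.count angka.toList [d] == 1)).map pyIntChar

-- ===== PRECONDITION & SPEC =====
-- Pre_ excludes exactly the inputs where Python's int(c) raises ValueError (in
-- both A and B): strings containing a non-digit character occurring exactly once.
def Pre_muncul_sekali (angka : String) : Prop :=
  (angka.toList.all (fun c => !(angka.toList.count c == 1) || c.isDigit)) = true
instance (angka : String) : Decidable (Pre_muncul_sekali angka) := by
  unfold Pre_muncul_sekali; infer_instance
def pvWitness_muncul_sekali : String := "1223"
def Spec_muncul_sekali (angka : String) (out : List Int) : Prop := out = muncul_sekali_alt angka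
instance (angka : String) (out : List Int) : Decidable (Spec_muncul_sekali angka out) := by unfold Spec_muncul_sekali; infer_instance

-- ===== CLAIM (what is proved, stated in full; the proofs are below) =====
def Claim_equal_muncul_sekali : Prop := ∀ (angka : String), Dom_muncul_sekali angka → Pre_muncul_sekali angka → Spec_muncul_sekali angka (muncul_sekali angka)

-- ===== LEMMAS AND PROOFS =====

-- PySem.Chars.count.go with a single-character needle counts occurrences of that character.
theorem go_single (c : Char) : ∀ (l : List Char) (fuel acc : Nat), l.length ≤ fuel →
    PySem.Chars.count.go [c] fuel l acc = acc + l.count c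
  | [], fuel, acc, _ => by cases fuel <;> simp [PySem.Chars.count.go]
  | h :: t, 0, acc, hle => by simp at hle
  | h :: t, fuel+1, acc, hle => by
    have ht : t.length ≤ fuel := by simpa using hle
    by_cases hc : h = c
    · simp [PySem.Chars.count.go, List.isPrefixOf, hc, go_single c t fuel (acc+1) ht]
      omega
    · simp [PySem.Chars.count.go, List.isPrefixOf, hc, go_single c t fuel acc ht,
        Ne.symm hc]

-- str.count on a single-character needle is List.count.
theorem count_single (l : List Char) (c : Char) : PySem.Chars.count l [c] = l.count c := by
  simp [PySem.Chars.count, go_single c l l.length 0 le_rfl]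

-- A Set.add fold over a seen-list appends the dedup of the unseen part.
theorem foldl_add_eq (t : List Char) (seen : List Char) :
    t.foldl PySem.Set.add seen =
      seen ++ (t.filter (fun x => !seen.contains x)).foldl PySem.Set.add [] := by
  induction ht : t.length using Nat.strong_induction_on generalizing t seen with
  | _ n ih =>
  cases t with
  | nil => simp
  | cons a t' =>
    by_cases ha : seen.contains a
    · have : PySem.Set.add seen a = seen := by
        simp [PySem.Set.add, PySem.Set.contains, (by simpa using ha : a ∈ seen)]
      simp only [List.foldl_cons, this, List.filter_cons, ha, Bool.not_true]
      exact ih t'.length (by simp [← ht]) t' seen rfl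
    · have hadd : PySem.Set.add seen a = seen ++ [a] := by
        simp [PySem.Set.add, PySem.Set.contains, (by simpa using ha : a ∉ seen)]
      have hadd0 : PySem.Set.add [] a = [a] := by simp [PySem.Set.add, PySem.Set.contains]
      simp only [List.foldl_cons, hadd, List.filter_cons, ha, Bool.not_false]
      rw [if_pos trivial, List.foldl_cons, hadd0]
      rw [ih t'.length (by simp [← ht]) t' (seen ++ [a]) rfl,
          ih (t'.filter (fun x => !seen.contains x)).length
             (by simpa [← ht, Nat.lt_succ_iff] using List.length_filter_le _ t')
             (t'.filter (fun x => !seen.contains x)) [a] rfl]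
      rw [List.filter_filter]
      have hpred : ∀ x : Char, (!(seen ++ [a]).contains x) =
          ((!([a] : List Char).contains x) && !seen.contains x) := by
        intro x; simp; exact Bool.and_comm _ _
      simp only [hpred, List.append_assoc, List.singleton_append]

-- First-occurrence dedup, unfolded one step from the left.
theorem ofList_cons (a : Char) (t : List Char) :
    PySem.Set.ofList (a :: t) =
      a :: PySem.Set.ofList (t.filter (fun x => !(x == a))) := by
  rw [PySem.Set.ofList_eq_foldl, PySem.Set.ofList_eq_foldl, List.foldl_cons]
  have hadd0 : PySem.Set.add [] a = [a] := by simp [PySem.Set.add, PySem.Set.contains]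
  rw [hadd0, foldl_add_eq]
  have : (List.filter (fun x => ! [a].contains x) t) = (List.filter (fun x => !(x == a)) t) := by
    apply List.filter_congr
    intro x _
    simp only [List.contains_cons, List.contains_nil, Bool.or_false]
  rw [this]
  rfl

theorem count_filter_le' (p : Char → Bool) (t : List Char) (c : Char) :
    (t.filter p).count c ≤ t.count c :=
  (List.filter_sublist (l := t)).count_le c

-- Filtering by a predicate that only keeps count-1 characters commutes with dedup.
theorem filter_ofList (p : Char → Bool) (l : List Char)
    (h : ∀ c, p c = true → l.count c ≤ 1) :
    (PySem.Set.ofList l).filter p = l.filter p := by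
  induction hn : l.length using Nat.strong_induction_on generalizing l with
  | _ n ih =>
  cases l with
  | nil => simp [PySem.Set.ofList]
  | cons a t =>
    rw [ofList_cons, List.filter_cons, List.filter_cons]
    by_cases hp : p a = true
    · have hct : t.count a = 0 := by
        have := h a hp; simp at this; omega
      have hat : a ∉ t := by simpa [List.count_eq_zero] using hct
      have hft : t.filter (fun x => !(x == a)) = t := by
        apply List.filter_eq_self.mpr
        intro x hx; simp; rintro rfl; exact hat hx
      rw [hft, if_pos hp, if_pos hp]
      congr 1
      refine ih t.length (by simp [← hn]) t (fun c hc => ?_) rfl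
      have := h c hc; simp [List.count_cons] at this ⊢; omega
    · rw [if_neg hp, if_neg hp]
      rw [ih (t.filter (fun x => !(x == a))).length
            (by simpa [← hn, Nat.lt_succ_iff] using List.length_filter_le _ t)
            (t.filter (fun x => !(x == a)))
            (fun c hc => by
              have h1 := count_filter_le' (fun x => !(x == a)) t c
              have h2 := h c hc
              simp [List.count_cons] at h2
              omega) rfl]
      rw [List.filter_filter]
      apply List.filter_congr
      intro x _
      by_cases hxa : x = a
      · subst hxa
        simp [hp]
      · simp [hxa]

-- The two ports agree on every input.
theorem ports_eq (angka : String) : muncul_sekali angka = muncul_sekali_alt angka := by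
  unfold muncul_sekali muncul_sekali_alt
  show (((angka.toList.foldl
        (fun d digit =>
          if d.contains digit then d.insert digit (d.getD digit 0 + 1)
          else d.insert digit 1)
        (PySem.Dict.empty : PySem.Dict Char Int))).items.foldl
      (fun result p => if p.2 == 1 then result ++ [pyIntChar p.1] else result) [])
    = _
  set l := angka.toList with hl
  have hdict : l.foldl
      (fun d digit =>
        if d.contains digit then d.insert digit (d.getD digit 0 + 1)
        else d.insert digit 1)
      (PySem.Dict.empty : PySem.Dict Char Int) = PySem.Dict.counter l := by
    have hcongr := PySem.List.foldl_congr_mem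
      (l := l) (init := (PySem.Dict.empty : PySem.Dict Char Int))
      (f := fun d digit =>
        if d.contains digit then d.insert digit (d.getD digit 0 + 1)
        else d.insert digit 1)
      (g := fun d digit => d.insert digit (d.getD digit 0 + 1))
      (by intro d c _
          by_cases hc : d.contains c = true
          · simp [hc]
          · have hcf : d.contains c = false := by simpa using hc
            simp only [hcf, if_false, Bool.false_eq_true,
              PySem.Dict.getD_of_not_contains d 0 hcf, zero_add])
    exact hcongr.trans (PySem.Dict.foldl_insert_getD_add_one_eq_counter l)
  rw [hdict]
  rw [PySem.List.foldl_append_if (p := fun p : Char × Int => p.2 == 1)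
        (f := fun p : Char × Int => pyIntChar p.1),
      PySem.Dict.items_counter, List.nil_append]
  rw [List.filter_map, List.map_map]
  rw [filter_ofList _ l (by
    intro c hc
    simp at hc
    omega)]
  have : l.filter ((fun p : Char × Int => p.2 == 1) ∘ fun k => (k, (l.count k : Int)))
       = l.filter (fun d => PySem.Chars.count l [d] == 1) := by
    apply List.filter_congr
    intro x _
    simp [count_single]
  rw [this]
  rfl

-- ===== VERDICT (by name: the statement is the Claim_ definition above) =====
theorem muncul_sekali_spec : Claim_equal_muncul_sekali := by
  intro angka _ _
  exact ports_eq angka
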